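-- pv_equiv track=rewrite | github.com/mtepenner/snorkel-tasks | ml-model-mgmt/tests/test_m1.py | _binary_indicator_columns
-- ===== SOURCE A (Python) =====
-- def _binary_indicator_columns(rows, exclude=None):
--     exclude = set(exclude or [])
--     if not rows:
--         return []
--     return [
--         key
--         for key in rows[0]
--         if key not in exclude and all(row[key] in (0, 1) for row in rows)
--     ]
-- ===== SOURCE B (Python) =====
-- def _binary_indicator_columns(rows, exclude=None):
--     bad = {}
--     for row in rows:
--         for key, value in row.items():
--             if value not in (0, 1):
--                 bad[key] = True
--     excluded = set(exclude or [])
--     if not rows: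
--         return []
--     return [key for key in rows[0] if key not in excluded and key not in bad]
-- ===== Notes on version B (the rewrite author's own statement) =====
-- stated objective: alternative
-- what changed: Replaces A's per-key scan over all rows (nested all() per candidate key) by one pass over every (key, value) pair of every row that builds a 'bad' dict of keys seen with a non-0/1 value, then a single filter of rows[0] against the exclude set and that dict.
import Mathlib
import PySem

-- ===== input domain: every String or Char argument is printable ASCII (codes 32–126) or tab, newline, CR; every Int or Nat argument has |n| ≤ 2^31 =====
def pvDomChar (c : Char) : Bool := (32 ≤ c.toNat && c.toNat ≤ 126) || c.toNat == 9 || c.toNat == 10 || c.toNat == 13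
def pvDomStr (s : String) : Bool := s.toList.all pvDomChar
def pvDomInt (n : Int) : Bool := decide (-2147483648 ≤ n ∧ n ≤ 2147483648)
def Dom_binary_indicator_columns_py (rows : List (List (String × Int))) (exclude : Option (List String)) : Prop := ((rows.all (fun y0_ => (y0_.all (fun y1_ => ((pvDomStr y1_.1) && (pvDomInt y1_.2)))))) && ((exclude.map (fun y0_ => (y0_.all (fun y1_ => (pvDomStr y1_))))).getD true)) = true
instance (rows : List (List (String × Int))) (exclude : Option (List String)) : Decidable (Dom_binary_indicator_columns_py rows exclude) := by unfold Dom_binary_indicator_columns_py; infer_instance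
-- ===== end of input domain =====

-- B replaces A's per-key scan over all rows by one pass over all (key,value) pairs building a 'bad'-key dict, then a single filter of rows[0] (alternative decomposition, same cost).


-- ===== PORT A =====
-- row[key]: Python raises KeyError when the key is absent; Pre_ excludes exactly those inputs,
-- so the sentinel default 2 (never in (0,1)) is only ever read outside the claimed domain.
def binary_indicator_columns_py (rows : List (List (String × Int))) (exclude : Option (List String)) : List String :=
  let excl : PySem.Set String := PySem.Set.ofList (exclude.getD [])
  match rows with
  | [] => []
  | r0 :: _ =>
    (PySem.Dict.ofList r0).keys.filter (fun key =>
      !(PySem.Set.contains excl key) &&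
      rows.all (fun row =>
        let v := (PySem.Dict.ofList row).getD key 2
        v == 0 || v == 1))

-- ===== PORT B =====
def binary_indicator_columns_py_alt (rows : List (List (String × Int))) (exclude : Option (List String)) : List String :=
  let bad : PySem.Dict String Bool :=
    rows.foldl (fun bad row =>
      (PySem.Dict.ofList row).items.foldl (fun bad kv =>
        if !(kv.2 == 0 || kv.2 == 1) then bad.insert kv.1 true else bad) bad)
      PySem.Dict.empty
  let excluded : PySem.Set String := PySem.Set.ofList (exclude.getD [])
  match rows with
  | [] => []
  | r0 :: _ =>
    (PySem.Dict.ofList r0).keys.filter (fun key =>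
      !(PySem.Set.contains excluded key) && !(bad.contains key))

-- ===== PRECONDITION & SPEC =====
-- Pre_ excludes exactly the inputs where Python A raises KeyError: some non-excluded key of
-- rows[0] is missing from a row without an earlier row having already given it a non-0/1 value
-- (Python's all() short-circuits, so an earlier bad value prevents the KeyError).
def Pre_binary_indicator_columns_py (rows : List (List (String × Int))) (exclude : Option (List String)) : Prop :=
  ∀ key ∈ (PySem.Dict.ofList (rows.headD [])).keys.filter
      (fun k => !(PySem.Set.contains (PySem.Set.ofList (exclude.getD [])) k)),
    ∀ i < rows.length,
      (PySem.Dict.ofList rows[i]!).get? key = none →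
      ∃ j < i, ∃ v, (PySem.Dict.ofList rows[j]!).get? key = some v ∧ v ≠ 0 ∧ v ≠ 1
instance (rows : List (List (String × Int))) (exclude : Option (List String)) : Decidable (Pre_binary_indicator_columns_py rows exclude) := by unfold Pre_binary_indicator_columns_py; infer_instance

def pvWitness_binary_indicator_columns_py : (List (List (String × Int))) × Option (List String) :=
  ([[("a", 0), ("b", 5)], [("a", 1)]], some ["c"])

def Spec_binary_indicator_columns_py (rows : List (List (String × Int))) (exclude : Option (List String)) (out : List String) : Prop := out = binary_indicator_columns_py_alt rows exclude
instance (rows : List (List (String × Int))) (exclude : Option (List String)) (out : List String) : Decidable (Spec_binary_indicator_columns_py rows exclude out) := by unfold Spec_binary_indicator_columns_py; infer_instance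

-- ===== CLAIM (what is proved, stated in full; the proofs are below) =====
def Claim_equal_binary_indicator_columns_py : Prop := ∀ (rows : List (List (String × Int))) (exclude : Option (List String)), Dom_binary_indicator_columns_py rows exclude → Pre_binary_indicator_columns_py rows exclude → Spec_binary_indicator_columns_py rows exclude (binary_indicator_columns_py rows exclude)

-- ===== LEMMAS AND PROOFS =====

-- the per-pair test B applies while building the bad dict
def pvBadPair (k : String) (kv : String × Int) : Bool := kv.1 == k && !(kv.2 == 0 || kv.2 == 1)

-- inner loop of B: membership in the bad dict after one row's items
theorem contains_foldl_items (k : String) :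
    ∀ (items : List (String × Int)) (d : PySem.Dict String Bool),
      ((items.foldl (fun bad kv => if !(kv.2 == 0 || kv.2 == 1) then bad.insert kv.1 true else bad) d).contains k)
        = (d.contains k || items.any (pvBadPair k)) := by
  intro items
  induction items with
  | nil => intro d; simp
  | cons kv rest ih =>
      intro d
      simp only [List.foldl_cons, List.any_cons, ih]
      by_cases hb : (kv.2 == 0 || kv.2 == 1)
      · simp [pvBadPair, hb]
      · simp only [Bool.not_eq_true] at hb
        simp only [hb, Bool.not_false, if_true, pvBadPair, Bool.and_true,
          PySem.Dict.contains_insert, BEq.comm (b := kv.1)]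
        cases kv.1 == k <;> simp

-- outer loop of B: membership in the final bad dict
theorem contains_bad_eq_any (k : String) :
    ∀ (rows : List (List (String × Int))) (d : PySem.Dict String Bool),
      ((rows.foldl (fun bad row =>
          (PySem.Dict.ofList row).items.foldl (fun bad kv =>
            if !(kv.2 == 0 || kv.2 == 1) then bad.insert kv.1 true else bad) bad) d).contains k)
        = (d.contains k || rows.any (fun row => (PySem.Dict.ofList row).items.any (pvBadPair k))) := by
  intro rows
  induction rows with
  | nil => intro d; simp
  | cons r rest ih =>
      intro d
      simp only [List.foldl_cons, List.any_cons, ih, contains_foldl_items, Bool.or_assoc]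

-- scanning a dict's items for key k with test p is a lookup (keys are unique)
theorem items_any_eq_get? (d : PySem.Dict String Int) (hnd : d.keys.Nodup) (k : String) (p : Int → Bool) :
    d.items.any (fun kv => kv.1 == k && p kv.2) = ((d.get? k).map p).getD false := by
  cases hg : d.get? k with
  | none =>
      simp only [Option.map_none, Option.getD_none]
      rw [List.any_eq_false]
      intro kv hkv
      simp only [Bool.and_eq_true, beq_iff_eq, not_and]
      intro hk
      have : k ∈ d.keys := by
        have := PySem.Dict.mem_keys_of_mem_items (d := d) (p := kv) hkv
        rwa [hk] at this
      rw [PySem.Dict.get?_eq_none_iff_not_mem_keys] at hg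
      exact absurd this hg
  | some v =>
      simp only [Option.map_some, Option.getD_some]
      cases hp : p v with
      | true =>
          rw [List.any_eq_true]
          exact ⟨(k, v), PySem.Dict.mem_items_of_get?_eq_some _ hg, by simp [hp]⟩
      | false =>
          rw [List.any_eq_false]
          intro kv hkv
          simp only [Bool.and_eq_true, beq_iff_eq, not_and]
          intro hk
          have h2 : d.get? kv.1 = some kv.2 :=
            PySem.Dict.get?_of_mem_items _ (by rw [Prod.mk.eta]; exact hkv) hnd
          rw [hk, hg] at h2
          have hv : kv.2 = v := (Option.some.inj h2).symm
          simp [hv, hp]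


-- one row's bad test, phrased as a lookup
theorem items_any_bad (row : List (String × Int)) (k : String) :
    (PySem.Dict.ofList row).items.any (pvBadPair k)
      = (((PySem.Dict.ofList row).get? k).map (fun v => !(v == 0 || v == 1))).getD false := by
  exact items_any_eq_get? (PySem.Dict.ofList row) (PySem.Dict.nodup_keys_ofList _) k
    (fun v => !(v == 0 || v == 1))

-- the per-key core: under Pre_'s missing-key condition for k, A's all-rows-0/1 test
-- agrees with the negation of B's any-bad-value test
theorem all_good_eq_not_any_bad (rows : List (List (String × Int))) (k : String)
    (h : ∀ i < rows.length, (PySem.Dict.ofList rows[i]!).get? k = none →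
          ∃ j < i, ∃ v, (PySem.Dict.ofList rows[j]!).get? k = some v ∧ v ≠ 0 ∧ v ≠ 1) :
    (rows.all (fun row =>
        ((PySem.Dict.ofList row).getD k 2 == 0 || (PySem.Dict.ofList row).getD k 2 == 1)))
      = !(rows.any (fun row =>
          (((PySem.Dict.ofList row).get? k).map (fun v => !(v == 0 || v == 1))).getD false)) := by
  cases hany : rows.any (fun row =>
      (((PySem.Dict.ofList row).get? k).map (fun v => !(v == 0 || v == 1))).getD false) with
  | true =>
      simp only [Bool.not_true]
      rw [List.all_eq_false]
      rw [List.any_eq_true] at hany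
      obtain ⟨row, hrow, hbad⟩ := hany
      refine ⟨row, hrow, ?_⟩
      cases hg : (PySem.Dict.ofList row).get? k with
      | none => rw [hg] at hbad; simp at hbad
      | some v =>
          rw [hg] at hbad
          simp only [Option.map_some, Option.getD_some, Bool.not_eq_true'] at hbad
          simp [PySem.Dict.getD_eq_get?_getD, hg, hbad]
  | false =>
      simp only [Bool.not_false]
      rw [List.all_eq_true]
      rw [List.any_eq_false] at hany
      intro row hrow
      cases hg : (PySem.Dict.ofList row).get? k with
      | some v =>
          have := hany row hrow
          rw [hg] at this
          simp only [Option.map_some, Option.getD_some, Bool.not_eq_true'] at this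
          simp [PySem.Dict.getD_eq_get?_getD, hg, this]
      | none =>
          obtain ⟨i, hi, hgi⟩ := List.mem_iff_getElem.mp hrow
          have hget : (PySem.Dict.ofList rows[i]!).get? k = none := by
            rw [getElem!_pos rows i hi, hgi]; exact hg
          obtain ⟨j, hj, v, hv, hv0, hv1⟩ := h i hi hget
          have hjlen : j < rows.length := lt_trans hj hi
          have hmem : rows[j]! ∈ rows := by
            rw [getElem!_pos rows j hjlen]; exact List.getElem_mem _
          have := hany _ hmem
          rw [hv] at this
          simp only [Option.map_some, Option.getD_some, Bool.not_eq_true'] at this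
          have hb : (v == 0 || v == 1) = true := by
            cases hvb : (v == 0 || v == 1) with
            | true => rfl
            | false => exact absurd hvb this
          simp only [Bool.or_eq_true, beq_iff_eq] at hb
          rcases hb with h0 | h1
          · exact absurd h0 hv0
          · exact absurd h1 hv1

theorem binary_indicator_columns_py_witness_ok :
    Dom_binary_indicator_columns_py pvWitness_binary_indicator_columns_py.1 pvWitness_binary_indicator_columns_py.2 ∧
    Pre_binary_indicator_columns_py pvWitness_binary_indicator_columns_py.1 pvWitness_binary_indicator_columns_py.2 := by
  decide

-- ===== VERDICT (by name: the statement is the Claim_ definition above) =====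
theorem binary_indicator_columns_py_spec : Claim_equal_binary_indicator_columns_py := by
  intro rows exclude _ hpre
  unfold Spec_binary_indicator_columns_py binary_indicator_columns_py binary_indicator_columns_py_alt
  cases rows with
  | nil => rfl
  | cons r0 rest =>
      apply Eq.symm
      apply List.filter_congr
      intro k hk
      by_cases hmem : k ∈ exclude.getD []
      · simp [hmem]
      · have hpk := hpre k (List.mem_filter.mpr ⟨by simpa using hk, by simp [hmem]⟩)
        rw [contains_bad_eq_any, PySem.Dict.contains_empty, Bool.false_or]
        simp only [items_any_bad, ← all_good_eq_not_any_bad (r0 :: rest) k hpk]
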